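-- pv_equiv track=rewrite | github.com/gva-jhabte/application-repo | transformations/QVM_ALL_REPORT/Main.py | getMaxCBP
-- ===== SOURCE A (Python) =====
-- def getMaxCBP(CBPFromFinding):
--     # CBP is per service/application on an asset. This will manifest as being returned as a string if there is
--     # only one, but a list of strings if more than one. Allow either to be processed by this method, seeking
--     # to return the most significant value
--     if CBPFromFinding is None:
--         return ''
--     elif type(CBPFromFinding) is str:
--         return CBPFromFinding
--     else: # This is a list (or similar) of strings representing multiple CPBs for an asset.
--         CBPToReturn = ''
--         for CBP in CBPFromFinding:
--             if CBP is None: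
--                 continue # a missing CBP value won't affect the returned rating
--             elif CBP == 'Tier A':
--                 return 'Tier A' # No point in searching further
--             elif CBP == 'Tier B':
--                 CBPToReturn = 'Tier B'  # Highest cat that doesn't cause the loop to break
--             elif CBP == 'Tier C' and CBPToReturn == '':
--                 CBPToReturn = 'Tier C' # Only other possible value. Only set if if no CBP has been set before
--
--     return CBPToReturn # All values checked, no Tier A found. Return what has been found.
-- ===== SOURCE B (Python) =====
-- def getMaxCBP(CBPFromFinding):
--     if CBPFromFinding is None:
--         return ''
--     if type(CBPFromFinding) is str:
--         return CBPFromFinding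
--     present = set(CBPFromFinding)
--     for tier in ('Tier A', 'Tier B', 'Tier C'):
--         if tier in present:
--             return tier
--     return ''
-- ===== Notes on version B (the rewrite author's own statement) =====
-- stated objective: idiomatic
-- what changed: Instead of scanning the input while maintaining a running best tier with an early return, B builds a set of the input once and scans the fixed tier priority order, returning the first tier present.
import Mathlib
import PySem

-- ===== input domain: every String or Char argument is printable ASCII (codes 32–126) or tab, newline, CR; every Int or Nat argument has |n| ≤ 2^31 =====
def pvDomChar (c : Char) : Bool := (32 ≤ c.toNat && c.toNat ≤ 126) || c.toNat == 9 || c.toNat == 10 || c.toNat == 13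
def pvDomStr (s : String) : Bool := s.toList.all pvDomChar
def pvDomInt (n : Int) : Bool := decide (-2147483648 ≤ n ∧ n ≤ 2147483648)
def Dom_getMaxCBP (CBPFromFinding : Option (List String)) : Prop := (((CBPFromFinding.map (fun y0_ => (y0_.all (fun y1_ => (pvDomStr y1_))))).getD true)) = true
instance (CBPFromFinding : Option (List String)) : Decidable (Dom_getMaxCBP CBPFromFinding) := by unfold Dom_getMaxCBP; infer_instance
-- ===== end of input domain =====

-- B scans the fixed priority order over a set of the input instead of scanning the
-- input with a running best (objective: more idiomatic; same exact return value).
-- Under the type convention the argument is Option (List String): the Python str branch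
-- and the 'CBP is None' element skip are unreachable (elements are Strings) and vanish.

-- ===== PORT A =====
-- A's loop over the input list, carrying CBPToReturn; early return on 'Tier A'.
def pvLoopA : List String → String → String
  | [], acc => acc
  | c :: cs, acc =>
    if c = "Tier A" then "Tier A"
    else if c = "Tier B" then pvLoopA cs "Tier B"
    else if c = "Tier C" ∧ acc = "" then pvLoopA cs "Tier C"
    else pvLoopA cs acc

def getMaxCBP (CBPFromFinding : Option (List String)) : String :=
  match CBPFromFinding with
  | none => ""
  | some xs => pvLoopA xs ""

-- ===== PORT B =====
-- B's loop over the priority tuple, testing membership in the set of the input.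
def pvLoopB (present : PySem.Set String) : List String → String
  | [] => ""
  | t :: ts => if t ∈ present then t else pvLoopB present ts

def getMaxCBP_alt (CBPFromFinding : Option (List String)) : String :=
  match CBPFromFinding with
  | none => ""
  | some xs => pvLoopB (PySem.Set.ofList xs) ["Tier A", "Tier B", "Tier C"]

-- ===== PRECONDITION & SPEC =====
def Spec_getMaxCBP (CBPFromFinding : Option (List String)) (out : String) : Prop := out = getMaxCBP_alt CBPFromFinding
instance (CBPFromFinding : Option (List String)) (out : String) : Decidable (Spec_getMaxCBP CBPFromFinding out) := by unfold Spec_getMaxCBP; infer_instance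

-- ===== CLAIM (what is proved, stated in full; the proofs are below) =====
def Claim_equal_getMaxCBP : Prop := ∀ (CBPFromFinding : Option (List String)), Dom_getMaxCBP CBPFromFinding → Spec_getMaxCBP CBPFromFinding (getMaxCBP CBPFromFinding)

-- ===== LEMMAS AND PROOFS =====

-- Characterisation of A's loop for the reachable accumulator values.
theorem pvLoopA_char (xs : List String) (acc : String)
    (hacc : acc = "" ∨ acc = "Tier B" ∨ acc = "Tier C") :
    pvLoopA xs acc =
      if "Tier A" ∈ xs then "Tier A"
      else if "Tier B" ∈ xs then "Tier B"
      else if acc = "Tier B" then "Tier B"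
      else if "Tier C" ∈ xs then "Tier C"
      else acc := by
  induction xs generalizing acc with
  | nil =>
    rcases hacc with h | h | h <;> simp [pvLoopA, h]
  | cons c cs ih =>
    by_cases hA : c = "Tier A"
    · simp [pvLoopA, hA]
    · by_cases hB : c = "Tier B"
      · rw [show pvLoopA (c :: cs) acc = pvLoopA cs "Tier B" by simp [pvLoopA, hB]]
        rw [ih "Tier B" (Or.inr (Or.inl rfl))]
        simp [hA, hB, List.mem_cons]
      · by_cases hC : c = "Tier C"
        · by_cases he : acc = ""
          · rw [show pvLoopA (c :: cs) acc = pvLoopA cs "Tier C" by simp [pvLoopA, hB, hC, he]]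
            rw [ih "Tier C" (Or.inr (Or.inr rfl))]
            simp [hA, hB, hC, he, List.mem_cons]
          · rw [show pvLoopA (c :: cs) acc = pvLoopA cs acc by simp [pvLoopA, hA, hB, he]]
            rw [ih acc hacc]
            rcases hacc with h | h | h
            · exact absurd h he
            · simp [hA, hB, hC, h, List.mem_cons]
            · simp [hA, hB, hC, h, List.mem_cons]
        · rw [show pvLoopA (c :: cs) acc = pvLoopA cs acc by simp [pvLoopA, hA, hB, hC]]
          rw [ih acc hacc]
          simp [Ne.symm hA, Ne.symm hB, Ne.symm hC, List.mem_cons]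

-- B's loop on the literal priority list, written out.
theorem pvLoopB_char (xs : List String) :
    pvLoopB (PySem.Set.ofList xs) ["Tier A", "Tier B", "Tier C"] =
      if "Tier A" ∈ xs then "Tier A"
      else if "Tier B" ∈ xs then "Tier B"
      else if "Tier C" ∈ xs then "Tier C"
      else "" := by
  simp [pvLoopB, PySem.Set.mem_ofList]

-- ===== VERDICT (by name: the statement is the Claim_ definition above) =====
theorem getMaxCBP_spec : Claim_equal_getMaxCBP := by
  intro o _
  unfold Spec_getMaxCBP getMaxCBP getMaxCBP_alt
  cases o with
  | none => rfl
  | some xs =>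
    show pvLoopA xs "" = pvLoopB (PySem.Set.ofList xs) ["Tier A", "Tier B", "Tier C"]
    rw [pvLoopA_char xs "" (Or.inl rfl), pvLoopB_char]
    simp
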